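-- pv_equiv track=rewrite | github.com/hotel-risk-bot/hotel-risk-bot | marketing_update_generator.py | _get_gl_metrics
-- ===== SOURCE A (Python) =====
-- def _get_gl_metrics(carriers_data, is_internal=True):
--     metrics = ["Premium", "# of Units", "Total Sales"]
--     if is_internal:
--         metrics.extend(["GL Rate", "GL Rate/Unit"])
--     metrics.extend(["GL Deductible", "# of Locations"])
--     all_values = {}
--     for c in carriers_data:
--         for k, v in c["values"].items():
--             if k not in all_values:
--                 all_values[k] = []
--             all_values[k].append(v)
--     # Broker on all versions
--     if "Broker" in all_values and any(v != "\u2014" for v in all_values["Broker"]):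
--         metrics.append("Broker")
--     if is_internal:
--         for m in ["Commission", "Revenue"]:
--             if m in all_values and any(v != "\u2014" for v in all_values[m]):
--                 metrics.append(m)
--     return metrics
-- ===== SOURCE B (Python) =====
-- def _get_gl_metrics(carriers_data, is_internal=True):
--     metrics = ["Premium", "# of Units", "Total Sales"]
--     if is_internal:
--         metrics.extend(["GL Rate", "GL Rate/Unit"])
--     metrics.extend(["GL Deductible", "# of Locations"])
--     dash = "\u2014"
--     has_broker = has_commission = has_revenue = False
--     for c in carriers_data:
--         vals = c["values"]
--         has_broker = has_broker or vals.get("Broker", dash) != dash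
--         has_commission = has_commission or vals.get("Commission", dash) != dash
--         has_revenue = has_revenue or vals.get("Revenue", dash) != dash
--     if has_broker:
--         metrics.append("Broker")
--     if is_internal:
--         if has_commission:
--             metrics.append("Commission")
--         if has_revenue:
--             metrics.append("Revenue")
--     return metrics
-- ===== Notes on version B (the rewrite author's own statement) =====
-- stated objective: simpler
-- what changed: Replaces A's dict-of-lists index over all keys (built in a separate pass, then queried) with a single pass over carriers_data maintaining three booleans, one per metric of interest; the only three keys ever consulted are probed directly with .get(key, dash) != dash.
import Mathlib
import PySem

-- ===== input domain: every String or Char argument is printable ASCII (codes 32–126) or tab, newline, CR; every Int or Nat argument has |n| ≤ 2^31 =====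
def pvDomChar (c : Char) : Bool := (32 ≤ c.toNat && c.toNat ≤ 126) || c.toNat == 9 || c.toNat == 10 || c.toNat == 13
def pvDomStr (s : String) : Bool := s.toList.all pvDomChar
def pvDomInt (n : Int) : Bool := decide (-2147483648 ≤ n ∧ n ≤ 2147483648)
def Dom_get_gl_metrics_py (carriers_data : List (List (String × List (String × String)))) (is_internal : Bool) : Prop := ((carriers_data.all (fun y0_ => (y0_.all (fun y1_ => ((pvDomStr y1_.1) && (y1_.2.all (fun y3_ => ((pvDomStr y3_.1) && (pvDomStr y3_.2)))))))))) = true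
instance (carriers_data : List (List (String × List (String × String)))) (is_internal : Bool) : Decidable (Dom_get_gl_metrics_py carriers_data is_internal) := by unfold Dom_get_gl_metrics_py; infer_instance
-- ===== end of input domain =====

-- B replaces A's dict-of-lists index over all keys with one pass keeping three booleans
-- (Broker/Commission/Revenue presence); objective: simpler.


-- ===== PORT A =====
def pvDash : String := "\u2014"

-- the carrier's "values" dict (empty if the key is absent — Pre_ excludes that case, where Python raises KeyError)
def pvValsOf (c : List (String × List (String × String))) : PySem.Dict String String :=
  PySem.Dict.ofList ((PySem.Dict.ofList c).getD "values" [])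

-- `if k not in all_values: all_values[k] = []` then `all_values[k].append(v)`
def pvAddVal (d : PySem.Dict String (List String)) (kv : String × String) :
    PySem.Dict String (List String) :=
  let d1 := if d.contains kv.1 then d else d.insert kv.1 []
  d1.insert kv.1 (d1.getD kv.1 [] ++ [kv.2])

def pvAllValues (carriers_data : List (List (String × List (String × String)))) :
    PySem.Dict String (List String) :=
  carriers_data.foldl (fun d c => (pvValsOf c).items.foldl pvAddVal d) PySem.Dict.empty

-- `m in all_values and any(v != "—" for v in all_values[m])`
def pvCondA (av : PySem.Dict String (List String)) (m : String) : Bool :=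
  av.contains m && (av.getD m []).any (fun v => v != pvDash)

def get_gl_metrics_py (carriers_data : List (List (String × List (String × String)))) (is_internal : Bool) : List String :=
  let metrics := ["Premium", "# of Units", "Total Sales"]
  let metrics := if is_internal then metrics ++ ["GL Rate", "GL Rate/Unit"] else metrics
  let metrics := metrics ++ ["GL Deductible", "# of Locations"]
  let all_values := pvAllValues carriers_data
  let metrics := if pvCondA all_values "Broker" then metrics ++ ["Broker"] else metrics
  if is_internal then
    ["Commission", "Revenue"].foldl
      (fun ms m => if pvCondA all_values m then ms ++ [m] else ms) metrics
  else metrics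

-- ===== PORT B =====
def get_gl_metrics_py_alt (carriers_data : List (List (String × List (String × String)))) (is_internal : Bool) : List String :=
  let metrics := (["Premium", "# of Units", "Total Sales"]
      ++ (if is_internal then ["GL Rate", "GL Rate/Unit"] else []))
      ++ ["GL Deductible", "# of Locations"]
  let flags := carriers_data.foldl
    (fun (f : Bool × Bool × Bool) c =>
      let vals := pvValsOf c
      (f.1 || vals.getD "Broker" pvDash != pvDash,
       f.2.1 || vals.getD "Commission" pvDash != pvDash,
       f.2.2 || vals.getD "Revenue" pvDash != pvDash))
    (false, false, false)
  (metrics ++ (if flags.1 then ["Broker"] else []))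
    ++ (if is_internal then
          (if flags.2.1 then ["Commission"] else [])
            ++ (if flags.2.2 then ["Revenue"] else [])
        else [])

-- ===== PRECONDITION & SPEC =====
-- Pre_ excludes carriers without a "values" key, on which Python A (and B) raises KeyError.
def Pre_get_gl_metrics_py (carriers_data : List (List (String × List (String × String)))) (is_internal : Bool) : Prop :=
  ∀ c ∈ carriers_data, "values" ∈ c.map Prod.fst
instance (carriers_data : List (List (String × List (String × String)))) (is_internal : Bool) : Decidable (Pre_get_gl_metrics_py carriers_data is_internal) := by unfold Pre_get_gl_metrics_py; infer_instance

def pvWitness_get_gl_metrics_py : (List (List (String × List (String × String)))) × Bool :=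
  ([[("values", [("Broker", "Acme")])]], true)

def Spec_get_gl_metrics_py (carriers_data : List (List (String × List (String × String)))) (is_internal : Bool) (out : List String) : Prop := out = get_gl_metrics_py_alt carriers_data is_internal
instance (carriers_data : List (List (String × List (String × String)))) (is_internal : Bool) (out : List String) : Decidable (Spec_get_gl_metrics_py carriers_data is_internal out) := by unfold Spec_get_gl_metrics_py; infer_instance

-- ===== CLAIM (what is proved, stated in full; the proofs are below) =====
def Claim_equal_get_gl_metrics_py : Prop := ∀ (carriers_data : List (List (String × List (String × String)))) (is_internal : Bool), Dom_get_gl_metrics_py carriers_data is_internal → Pre_get_gl_metrics_py carriers_data is_internal → Spec_get_gl_metrics_py carriers_data is_internal (get_gl_metrics_py carriers_data is_internal)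

-- ===== LEMMAS AND PROOFS =====

-- A's two-step "ensure key, then append" equals a single modify (as Dicts).
theorem pvAddVal_eq_modify (d : PySem.Dict String (List String)) (kv : String × String) :
    pvAddVal d kv = d.modify kv.1 [] (· ++ [kv.2]) := by
  unfold pvAddVal
  simp only [PySem.Dict.modify, PySem.Dict.insert, PySem.Dict.contains, PySem.Dict.getD, PySem.Dict.get?]
  rcases Bool.eq_false_or_eq_true (d.items.any fun p => p.1 == kv.1) with h | h
  · simp [h]
  · have hf : d.items.find? (fun p => p.1 == kv.1) = none := by
      rw [List.find?_eq_none]; intro p hp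
      simpa using (List.any_eq_false.mp h) p hp
    simp [h, hf, List.find?_append]
    have hc : ∀ p ∈ d.items, (if p.1 = kv.1 then ((kv.1 : String), [kv.2]) else p) = p := by
      intro p hp
      have := (List.any_eq_false.mp h) p hp
      simp at this
      simp [this]
    rw [List.map_congr_left hc]; simp

-- in a list whose keys are distinct, filtering by a key yields the first (only) hit
theorem filter_key_eq_find (l : List (String × String)) (m : String)
    (h : (l.map Prod.fst).Nodup) :
    l.filter (fun p => p.1 == m) = (l.find? (fun p => p.1 == m)).elim [] (fun x => [x]) := by
  induction l with
  | nil => simp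
  | cons a t ih =>
    simp only [List.map_cons, List.nodup_cons] at h
    by_cases ha : a.1 = m
    · have ht : t.filter (fun p => p.1 == m) = [] := by
        rw [List.filter_eq_nil_iff]
        intro p hp hpm
        simp at hpm
        have hmem : p.1 ∈ t.map Prod.fst := List.mem_map.mpr ⟨p, hp, rfl⟩
        exact h.1 (by rw [ha, ← hpm]; exact hmem)
      simp [ha, ht]
    · simp [ha, ih h.2]

-- per-carrier: "some collected value for key m is non-dash" equals B's probe
theorem any_filter_eq_probe (c : List (String × List (String × String))) (m : String) :
    ((((pvValsOf c).items.filter (fun p => p.1 == m)).map (·.2)).any (fun v => v != pvDash))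
      = ((pvValsOf c).getD m pvDash != pvDash) := by
  have hnd : ((pvValsOf c).items.map Prod.fst).Nodup := PySem.Dict.nodup_keys_ofList _
  rw [filter_key_eq_find _ _ hnd]
  cases hf : (pvValsOf c).items.find? (fun p => p.1 == m) with
  | none => simp [PySem.Dict.getD, PySem.Dict.get?, hf]
  | some x => simp [PySem.Dict.getD, PySem.Dict.get?, hf]

-- A's membership-guarded any reduces to any over getD []
theorem pvCondA_eq_any_getD (av : PySem.Dict String (List String)) (m : String) :
    pvCondA av m = (av.getD m []).any (fun v => v != pvDash) := by
  unfold pvCondA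
  rcases Bool.eq_false_or_eq_true (av.contains m) with h | h
  · simp [h]
  · rw [PySem.Dict.getD_of_not_contains av [] h]; simp [h]

-- A's whole index query for key m equals the disjunction of B's per-carrier probes
theorem pvCondA_eq_anyCarrier (cd : List (List (String × List (String × String)))) (m : String) :
    pvCondA (pvAllValues cd) m = cd.any (fun c => (pvValsOf c).getD m pvDash != pvDash) := by
  rw [pvCondA_eq_any_getD]
  unfold pvAllValues
  have hstep : pvAddVal = fun (d : PySem.Dict String (List String)) (p : String × String) =>
      d.modify p.1 [] (· ++ [p.2]) := funext fun d => funext fun kv => pvAddVal_eq_modify d kv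
  rw [hstep]
  have hflat : cd.foldl
      (fun d c => (pvValsOf c).items.foldl (fun d p => d.modify p.1 [] (· ++ [p.2])) d)
      PySem.Dict.empty
      = (cd.flatMap (fun c => (pvValsOf c).items)).foldl
          (fun d p => d.modify p.1 [] (· ++ [p.2])) PySem.Dict.empty := by
    generalize PySem.Dict.empty = d0
    induction cd generalizing d0 with
    | nil => simp
    | cons c t ih => simp [List.flatMap_cons, List.foldl_append, ih]
  rw [hflat, PySem.Dict.getD_foldl_modify_append]
  simp only [PySem.Dict.getD_empty, List.nil_append, List.filter_flatMap, List.map_flatMap,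
    List.any_flatMap]
  exact List.any_congr rfl (fun c => any_filter_eq_probe c m)

-- the triple-boolean fold computes the three disjunctions
theorem flags_fold_eq (cd : List (List (String × List (String × String)))) (f : Bool × Bool × Bool) :
    cd.foldl
      (fun (f : Bool × Bool × Bool) c =>
        let vals := pvValsOf c
        (f.1 || vals.getD "Broker" pvDash != pvDash,
         f.2.1 || vals.getD "Commission" pvDash != pvDash,
         f.2.2 || vals.getD "Revenue" pvDash != pvDash)) f
    = (f.1 || cd.any (fun c => (pvValsOf c).getD "Broker" pvDash != pvDash),
       f.2.1 || cd.any (fun c => (pvValsOf c).getD "Commission" pvDash != pvDash),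
       f.2.2 || cd.any (fun c => (pvValsOf c).getD "Revenue" pvDash != pvDash)) := by
  induction cd generalizing f with
  | nil => simp
  | cons c t ih => simp [ih, Bool.or_assoc]

-- ===== VERDICT (by name: the statement is the Claim_ definition above) =====
theorem get_gl_metrics_py_spec : Claim_equal_get_gl_metrics_py := by
  intro cd is_internal _ _
  unfold Spec_get_gl_metrics_py get_gl_metrics_py get_gl_metrics_py_alt
  rw [flags_fold_eq]
  simp only [pvCondA_eq_anyCarrier, Bool.false_or, List.foldl]
  cases is_internal <;>
    rcases Bool.eq_false_or_eq_true (cd.any (fun c => (pvValsOf c).getD "Broker" pvDash != pvDash)) with h1 | h1 <;>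
    rcases Bool.eq_false_or_eq_true (cd.any (fun c => (pvValsOf c).getD "Commission" pvDash != pvDash)) with h2 | h2 <;>
    rcases Bool.eq_false_or_eq_true (cd.any (fun c => (pvValsOf c).getD "Revenue" pvDash != pvDash)) with h3 | h3 <;>
    simp [h1, h2, h3]
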